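-- pv_equiv track=rewrite | github.com/dnlbauer/adaptiveumbrella | adaptiveumbrella/runner.py | _generate_neighbor_list
-- ===== SOURCE A (Python) =====
-- def _generate_neighbor_list(root):
--     """ builds a list of all direct neighbors of the root coordinate """
--     dimens = len(root)
--     coords = []
--     for i in range(dimens):
--         if len(coords) == 0:
--             new_coords = []
--             new_coords.append([root[i]-1])
--             new_coords.append([root[i]])
--             new_coords.append([root[i]+1])
--             coords = new_coords
--         else:
--             new_coords = []
--             for coord in coords:
--                 new_coords.append(coord + [root[i] - 1])
--                 new_coords.append(coord + [root[i]])
--                 new_coords.append(coord + [root[i] + 1])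
--             coords = new_coords
--     return [tuple(x) for x in coords]
-- ===== SOURCE B (Python) =====
-- def _generate_neighbor_list(root):
--     """ builds a list of all direct neighbors of the root coordinate """
--     if len(root) == 0:
--         return []
--
--     def expand(values):
--         # recursively build all neighbor tuples for the given coordinates,
--         # front coordinate first, assembling tuples back-to-front
--         if not values:
--             return [()]
--         rest = expand(values[1:])
--         r = values[0]
--         return [(r + d,) + t for d in (-1, 0, 1) for t in rest]
--
--     return expand(list(root))
-- ===== Notes on version B (the rewrite author's own statement) =====
-- stated objective: alternative
-- what changed: Replaces A's iterative left-to-right loop that rebuilds and extends a growing accumulator list of partial coordinates (with a special empty-accumulator first pass) by a direct structural recursion on the coordinate list that assembles each neighbor tuple back-to-front, with an explicit empty-root guard.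
import Mathlib
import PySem

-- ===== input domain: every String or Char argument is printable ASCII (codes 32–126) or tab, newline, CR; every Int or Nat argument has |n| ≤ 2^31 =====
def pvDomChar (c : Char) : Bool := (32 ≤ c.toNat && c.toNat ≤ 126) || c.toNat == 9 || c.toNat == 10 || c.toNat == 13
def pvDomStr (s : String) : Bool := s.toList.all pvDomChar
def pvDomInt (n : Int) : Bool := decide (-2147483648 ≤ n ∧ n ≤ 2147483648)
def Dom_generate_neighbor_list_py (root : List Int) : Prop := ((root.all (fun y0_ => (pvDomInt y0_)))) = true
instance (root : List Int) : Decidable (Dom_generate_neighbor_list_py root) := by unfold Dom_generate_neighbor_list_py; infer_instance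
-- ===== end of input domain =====

-- B replaces A's accumulator-extending loop over dimensions by a structural recursion
-- building each neighbor tuple back-to-front; same output, same cost (objective: alternative).

-- ===== PORT A =====
def generate_neighbor_list_py (root : List Int) : List (List Int) :=
  let dimens : Int := PySem.List.len root
  let coords : List (List Int) :=
    (PySem.List.pyRange 0 dimens 1).foldl (fun coords i =>
      let ri := PySem.List.pyGetD root i 0   -- root[i]; i is always in range here
      if coords.length = 0 then
        [[ri - 1], [ri], [ri + 1]]
      else
        coords.foldl (fun new_coords coord =>
          new_coords ++ [coord ++ [ri - 1]] ++ [coord ++ [ri]] ++ [coord ++ [ri + 1]]) []) []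
  coords.map (fun x => x)   -- [tuple(x) for x in coords]

-- ===== PORT B =====
def pvExpand : List Int → List (List Int)
  | [] => [[]]
  | r :: rs =>
    let rest := pvExpand rs
    ([-1, 0, 1] : List Int).flatMap (fun d => rest.map (fun t => (r + d) :: t))

def generate_neighbor_list_py_alt (root : List Int) : List (List Int) :=
  if root.length = 0 then [] else pvExpand root

-- ===== PRECONDITION & SPEC =====
def Spec_generate_neighbor_list_py (root : List Int) (out : List (List Int)) : Prop := out = generate_neighbor_list_py_alt root
instance (root : List Int) (out : List (List Int)) : Decidable (Spec_generate_neighbor_list_py root out) := by unfold Spec_generate_neighbor_list_py; infer_instance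

-- ===== CLAIM (what is proved, stated in full; the proofs are below) =====
def Claim_equal_generate_neighbor_list_py : Prop := ∀ (root : List Int), Dom_generate_neighbor_list_py root → Spec_generate_neighbor_list_py root (generate_neighbor_list_py root)

-- ===== LEMMAS AND PROOFS =====

-- A's loop body, after eliminating the index-based access
def pvStep (coords : List (List Int)) (ri : Int) : List (List Int) :=
  if coords.length = 0 then
    [[ri - 1], [ri], [ri + 1]]
  else
    coords.foldl (fun new_coords coord =>
      new_coords ++ [coord ++ [ri - 1]] ++ [coord ++ [ri]] ++ [coord ++ [ri + 1]]) []

lemma pvStep_ne (coords : List (List Int)) (r : Int) (h : coords ≠ []) :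
    pvStep coords r = coords.flatMap (fun c => [c ++ [r - 1], c ++ [r], c ++ [r + 1]]) := by
  simp [pvStep, List.length_eq_zero_iff, h, List.flatMap_def]

lemma pvStep_ne_nil (coords : List (List Int)) (r : Int) (h : coords ≠ []) :
    pvStep coords r ≠ [] := by
  rw [pvStep_ne coords r h]
  cases coords with
  | nil => exact absurd rfl h
  | cons c cs => simp

lemma pvFoldl_step (xs : List Int) (acc : List (List Int)) (h : acc ≠ []) :
    xs.foldl pvStep acc = acc.flatMap (fun c => (pvExpand xs).map (fun t => c ++ t)) := by
  induction xs generalizing acc with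
  | nil => simp [pvExpand]
  | cons r rs ih =>
    rw [List.foldl_cons, ih _ (pvStep_ne_nil acc r h), pvStep_ne acc r h]
    simp only [pvExpand, List.flatMap_assoc]
    refine List.flatMap_congr (fun c _ => ?_)
    simp only [List.flatMap_cons, List.flatMap_nil, List.map_append, List.map_map,
      List.append_nil, Function.comp_def, sub_eq_add_neg, List.append_assoc, List.singleton_append, add_zero]

lemma pvA_foldl (root : List Int) :
    generate_neighbor_list_py root = root.foldl pvStep [] := by
  unfold generate_neighbor_list_py
  simp only [PySem.List.len_eq, List.map_id_fun', id]
  exact PySem.List.foldl_pyRange_zero_pyGetD' root 0 pvStep []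

theorem pv_main (root : List Int) :
    generate_neighbor_list_py root = generate_neighbor_list_py_alt root := by
  rw [pvA_foldl]
  cases root with
  | nil => simp [generate_neighbor_list_py_alt]
  | cons x xs =>
    rw [List.foldl_cons]
    have hstep : pvStep [] x = [[x - 1], [x], [x + 1]] := by simp [pvStep]
    rw [hstep, pvFoldl_step _ _ (by simp)]
    simp only [generate_neighbor_list_py_alt, List.length_cons, pvExpand]
    simp [List.flatMap_cons, sub_eq_add_neg]

-- ===== VERDICT (by name: the statement is the Claim_ definition above) =====
theorem generate_neighbor_list_py_spec : Claim_equal_generate_neighbor_list_py := by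
  intro root _
  exact pv_main root
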